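-- pv_equiv track=rewrite | github.com/Aadityapaudel2/AEN5 | browser/portal_server.py | _canvas_role_context
-- ===== SOURCE A (Python) =====
-- from typing import Any
--
-- def _canvas_role_context(enrollments: list[dict[str, Any]]) -> str:
--     lowered = " ".join(
--         str(item.get("type") or item.get("role") or "").lower()
--         for item in enrollments
--         if isinstance(item, dict)
--     )
--     if "teacher" in lowered or "instructor" in lowered:
--         return "Canvas instructor"
--     if "ta" in lowered:
--         return "Canvas teaching assistant"
--     if "observer" in lowered:
--         return "Canvas observer"
--     if "designer" in lowered:
--         return "Canvas course designer"
--     if enrollments: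
--         return "Canvas student"
--     return "Institution-linked user"
-- ===== SOURCE B (Python) =====
-- def _canvas_role_context(enrollments):
--     best = 4  # 4 = no role keyword seen
--     for item in enrollments:
--         if not isinstance(item, dict):
--             continue
--         s = str(item.get("type") or item.get("role") or "").lower()
--         if "teacher" in s or "instructor" in s:
--             rank = 0
--         elif "ta" in s:
--             rank = 1
--         elif "observer" in s:
--             rank = 2
--         elif "designer" in s:
--             rank = 3
--         else:
--             rank = 4
--         best = min(best, rank)
--     if best == 0:
--         return "Canvas instructor"
--     if best == 1:
--         return "Canvas teaching assistant"
--     if best == 2: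
--         return "Canvas observer"
--     if best == 3:
--         return "Canvas course designer"
--     return "Canvas student" if enrollments else "Institution-linked user"
-- ===== Notes on version B (the rewrite author's own statement) =====
-- stated objective: alternative
-- what changed: B drops A's space-joined string entirely: one pass over the enrollments keeps the minimum priority rank (teacher/instructor=0, ta=1, observer=2, designer=3) computed per item with the same substring tests, then maps the best rank to the role label.
import Mathlib
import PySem

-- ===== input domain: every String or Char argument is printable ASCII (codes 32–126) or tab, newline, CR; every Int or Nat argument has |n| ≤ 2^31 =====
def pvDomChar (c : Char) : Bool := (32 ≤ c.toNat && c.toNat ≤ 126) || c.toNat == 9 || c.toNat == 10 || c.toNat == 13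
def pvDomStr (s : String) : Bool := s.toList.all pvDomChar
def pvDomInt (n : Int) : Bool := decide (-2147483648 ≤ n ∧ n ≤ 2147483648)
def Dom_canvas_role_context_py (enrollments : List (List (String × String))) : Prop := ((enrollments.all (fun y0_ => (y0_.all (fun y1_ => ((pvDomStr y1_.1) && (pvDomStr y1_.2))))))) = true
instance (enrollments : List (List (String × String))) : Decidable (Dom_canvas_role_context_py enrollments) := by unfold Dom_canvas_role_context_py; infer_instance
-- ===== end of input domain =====

-- B replaces A's joined-string construction by a single pass keeping the minimum priority rank per item (same substring tests); objective: alternative decomposition.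

-- ===== PORT A =====
-- str(item.get("type") or item.get("role") or "").lower(), shared by both Pythons verbatim
def pvLowerItem (item : List (String × String)) : List Char :=
  let t := ((PySem.Dict.mk item).get? "type").getD ""
  let r := if t ≠ "" then t else ((PySem.Dict.mk item).get? "role").getD ""
  PySem.Chars.lower r.toList

def canvas_role_context_py (enrollments : List (List (String × String))) : String :=
  let lowered : List Char := PySem.Chars.join [' '] (enrollments.map pvLowerItem)
  if PySem.Chars.isIn "teacher".toList lowered || PySem.Chars.isIn "instructor".toList lowered then
    "Canvas instructor"
  else if PySem.Chars.isIn "ta".toList lowered then "Canvas teaching assistant"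
  else if PySem.Chars.isIn "observer".toList lowered then "Canvas observer"
  else if PySem.Chars.isIn "designer".toList lowered then "Canvas course designer"
  else if !enrollments.isEmpty then "Canvas student"
  else "Institution-linked user"

-- ===== PORT B =====
def pvRank (s : List Char) : Nat :=
  if PySem.Chars.isIn "teacher".toList s || PySem.Chars.isIn "instructor".toList s then 0
  else if PySem.Chars.isIn "ta".toList s then 1
  else if PySem.Chars.isIn "observer".toList s then 2
  else if PySem.Chars.isIn "designer".toList s then 3
  else 4

def canvas_role_context_py_alt (enrollments : List (List (String × String))) : String :=
  let best := enrollments.foldl (fun acc item => min acc (pvRank (pvLowerItem item))) 4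
  if best = 0 then "Canvas instructor"
  else if best = 1 then "Canvas teaching assistant"
  else if best = 2 then "Canvas observer"
  else if best = 3 then "Canvas course designer"
  else if !enrollments.isEmpty then "Canvas student"
  else "Institution-linked user"

-- ===== PRECONDITION & SPEC =====
def Spec_canvas_role_context_py (enrollments : List (List (String × String))) (out : String) : Prop := out = canvas_role_context_py_alt enrollments
instance (enrollments : List (List (String × String))) (out : String) : Decidable (Spec_canvas_role_context_py enrollments out) := by unfold Spec_canvas_role_context_py; infer_instance

-- ===== CLAIM (what is proved, stated in full; the proofs are below) =====
def Claim_equal_canvas_role_context_py : Prop := ∀ (enrollments : List (List (String × String))), Dom_canvas_role_context_py enrollments → Spec_canvas_role_context_py enrollments (canvas_role_context_py enrollments)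

-- ===== LEMMAS AND PROOFS =====

-- a needle avoiding c cannot reach past an occurrence of c
lemma pv_prefix_of_prefix_append {n a b : List Char} {c : Char}
    (hc : c ∉ n) (h : n <+: a ++ c :: b) : n <+: a := by
  induction n generalizing a with
  | nil => exact List.nil_prefix
  | cons y n' ih =>
    cases a with
    | nil =>
      rw [List.nil_append] at h
      rcases List.cons_prefix_cons.mp h with ⟨rfl, -⟩
      exact absurd (List.mem_cons_self) hc
    | cons z a' =>
      rw [List.cons_append] at h
      rcases List.cons_prefix_cons.mp h with ⟨rfl, h'⟩
      exact List.cons_prefix_cons.mpr ⟨rfl, ih (fun hm => hc (List.mem_cons_of_mem _ hm)) h'⟩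

-- an occurrence of a nonempty needle avoiding c lies wholly left or wholly right of c
lemma pv_infix_append_cons {n a b : List Char} {c : Char}
    (hc : c ∉ n) (hn : n ≠ []) : n <:+: a ++ c :: b ↔ n <:+: a ∨ n <:+: b := by
  constructor
  · intro h
    induction a with
    | nil =>
      rw [List.nil_append, List.infix_cons_iff] at h
      rcases h with hp | h'
      · cases n with
        | nil => exact absurd rfl hn
        | cons y n' =>
          rcases List.cons_prefix_cons.mp hp with ⟨rfl, -⟩
          exact absurd (List.mem_cons_self) hc
      · exact Or.inr h'
    | cons x a' ih =>
      rw [List.cons_append, List.infix_cons_iff] at h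
      rcases h with hp | h'
      · exact Or.inl (pv_prefix_of_prefix_append hc (by simpa using hp)).isInfix
      · rcases ih h' with h'' | h''
        · exact Or.inl (List.infix_cons h'')
        · exact Or.inr h''
  · rintro (⟨s, t, rfl⟩ | ⟨s, t, rfl⟩)
    · exact ⟨s, t ++ c :: b, by simp⟩
    · exact ⟨(a ++ c :: s), t, by simp⟩

-- substring of the space-join ↔ substring of some part (needle nonempty, no space)
lemma pv_isIn_join {n : List Char} (hc : ' ' ∉ n) (hn : n ≠ []) :
    ∀ ps : List (List Char),
      PySem.Chars.isIn n (PySem.Chars.join [' '] ps) = ps.any (fun p => PySem.Chars.isIn n p)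
  | [] => by
    rw [PySem.Chars.join_nil, List.any_nil]
    rw [PySem.Chars.isIn_eq_false_iff]
    simpa using hn
  | [p] => by rw [PySem.Chars.join_singleton, List.any_cons, List.any_nil, Bool.or_false]
  | p :: q :: rest => by
    rw [PySem.Chars.join_cons_cons, List.any_cons]
    have hrec := pv_isIn_join hc hn (q :: rest)
    rw [Bool.eq_iff_iff, PySem.Chars.isIn_iff_infix]
    have : p ++ [' '] ++ PySem.Chars.join [' '] (q :: rest)
        = p ++ ' ' :: PySem.Chars.join [' '] (q :: rest) := by simp
    rw [this, pv_infix_append_cons hc hn]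
    simp only [← PySem.Chars.isIn_iff_infix, hrec, Bool.or_eq_true]

lemma pv_rank_le_four (s : List Char) : pvRank s ≤ 4 := by
  unfold pvRank; split_ifs <;> omega

lemma pv_foldl_min_acc (l : List (List Char)) :
    ∀ a : Nat, a ≤ 4 →
      l.foldl (fun acc s => min acc (pvRank s)) a
        = min a (l.foldl (fun acc s => min acc (pvRank s)) 4) := by
  induction l with
  | nil => intro a ha; simpa using (Nat.min_eq_left ha).symm
  | cons s l ih =>
    intro a ha
    have hr := pv_rank_le_four s
    rw [List.foldl_cons, List.foldl_cons,
      ih (min a (pvRank s)) (by omega), ih (min 4 (pvRank s)) (by omega)]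
    generalize l.foldl (fun acc s => min acc (pvRank s)) 4 = x
    omega

lemma pv_best_cons (s : List Char) (l : List (List Char)) :
    (s :: l).foldl (fun acc s => min acc (pvRank s)) 4
      = min (pvRank s) (l.foldl (fun acc s => min acc (pvRank s)) 4) := by
  rw [List.foldl_cons, pv_foldl_min_acc l _ (by have := pv_rank_le_four s; omega)]
  have := pv_rank_le_four s
  omega

lemma pv_best_eq (l : List (List Char)) :
    l.foldl (fun acc s => min acc (pvRank s)) 4
      = if l.any (fun s => PySem.Chars.isIn "teacher".toList s || PySem.Chars.isIn "instructor".toList s) then 0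
        else if l.any (fun s => PySem.Chars.isIn "ta".toList s) then 1
        else if l.any (fun s => PySem.Chars.isIn "observer".toList s) then 2
        else if l.any (fun s => PySem.Chars.isIn "designer".toList s) then 3
        else 4 := by
  induction l with
  | nil => simp
  | cons s l ih =>
    rw [pv_best_cons, ih, List.any_cons, List.any_cons, List.any_cons, List.any_cons]
    unfold pvRank
    cases h1 : PySem.Chars.isIn "teacher".toList s <;>
      cases h2 : PySem.Chars.isIn "instructor".toList s <;>
      cases h3 : PySem.Chars.isIn "ta".toList s <;>
      cases h4 : PySem.Chars.isIn "observer".toList s <;>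
      cases h5 : PySem.Chars.isIn "designer".toList s <;>
      cases hA0 : l.any (fun s => PySem.Chars.isIn "teacher".toList s || PySem.Chars.isIn "instructor".toList s) <;>
      cases hA1 : l.any (fun s => PySem.Chars.isIn "ta".toList s) <;>
      cases hA2 : l.any (fun s => PySem.Chars.isIn "observer".toList s) <;>
      cases hA3 : l.any (fun s => PySem.Chars.isIn "designer".toList s) <;>
      simp

-- ===== VERDICT (by name: the statement is the Claim_ definition above) =====
theorem canvas_role_context_py_spec : Claim_equal_canvas_role_context_py := by
  intro enrollments _
  unfold Spec_canvas_role_context_py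
  simp only [canvas_role_context_py, canvas_role_context_py_alt]
  have hmap : enrollments.foldl (fun acc item => min acc (pvRank (pvLowerItem item))) 4
      = (enrollments.map pvLowerItem).foldl (fun acc s => min acc (pvRank s)) 4 := by
    rw [List.foldl_map]
  rw [hmap, pv_best_eq,
    pv_isIn_join (n := "teacher".toList) (by decide) (by decide),
    pv_isIn_join (n := "instructor".toList) (by decide) (by decide),
    pv_isIn_join (n := "ta".toList) (by decide) (by decide),
    pv_isIn_join (n := "observer".toList) (by decide) (by decide),
    pv_isIn_join (n := "designer".toList) (by decide) (by decide)]
  have hor : ((enrollments.map pvLowerItem).any (fun p => PySem.Chars.isIn "teacher".toList p)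
        || (enrollments.map pvLowerItem).any (fun p => PySem.Chars.isIn "instructor".toList p))
      = (enrollments.map pvLowerItem).any
          (fun s => PySem.Chars.isIn "teacher".toList s || PySem.Chars.isIn "instructor".toList s) := by
    rw [Bool.eq_iff_iff]
    simp only [Bool.or_eq_true, List.any_eq_true]
    constructor
    · rintro (⟨p, hp, h⟩ | ⟨p, hp, h⟩)
      exacts [⟨p, hp, Or.inl h⟩, ⟨p, hp, Or.inr h⟩]
    · rintro ⟨p, hp, h | h⟩
      exacts [Or.inl ⟨p, hp, h⟩, Or.inr ⟨p, hp, h⟩]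
  rw [hor]
  split_ifs <;> first | rfl | omega | simp_all
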